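-- pv_equiv track=rewrite | github.com/Workwrite-Niidome/voynich-manuscript-analysis | archive/scripts/hybrid_morpheme_analysis.py | segment_word
-- ===== SOURCE A (Python) =====
-- PREFIXES = sorted([
--     'cth', 'sh', 'ch', 'qo', 'ok', 'ot', 'ct',
--     'o', 'd', 's', 'k', 't', 'p', 'f', 'y'
-- ], key=len, reverse=True)
--
-- SUFFIXES = sorted([
--     'aiin', 'ain', 'iin',
--     'eey', 'edy', 'ey',
--     'ol', 'or', 'al', 'ar', 'an', 'am',
--     'dy', 'y',
--     'n', 'l', 'r'
-- ], key=len, reverse=True)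
--
-- def segment_word(word):
--     """Segment a word into (prefix, stem, suffix)."""
--     if len(word) <= 1:
--         return ('', word, '')
--
--     prefix = ''
--     suffix = ''
--     remaining = word
--
--     # Try to match prefix (greedy longest match)
--     for p in PREFIXES:
--         if remaining.startswith(p) and len(remaining) > len(p):
--             prefix = p
--             remaining = remaining[len(p):]
--             break
--
--     # Try to match suffix (greedy longest match)
--     for s in SUFFIXES:
--         if remaining.endswith(s) and len(remaining) > len(s):
--             suffix = s
--             remaining = remaining[:-len(s)]
--             break
--         # Also try if remaining == suffix (no stem)
--         elif remaining.endswith(s) and len(remaining) == len(s) and prefix: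
--             suffix = s
--             remaining = ''
--             break
--
--     stem = remaining
--     return (prefix, stem, suffix)
-- ===== SOURCE B (Python) =====
-- # Different algorithm: instead of scanning affix lists, walk the word once,
-- # character by character, through a trie (flat node table) of the prefixes,
-- # keeping the deepest valid terminal depth; likewise walk the reversed
-- # remainder through a trie of the reversed suffixes.
--
-- _PREFIX_WORDS = ['cth', 'sh', 'ch', 'qo', 'ok', 'ot', 'ct',
--                  'o', 'd', 's', 'k', 't', 'p', 'f', 'y']
-- _SUFFIX_WORDS = ['aiin', 'ain', 'iin', 'eey', 'edy', 'ey',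
--                  'ol', 'or', 'al', 'ar', 'an', 'am', 'dy', 'y', 'n', 'l', 'r']
--
-- def _build_trie(words):
--     """Flat trie: list of [terminal, {char: child_index}]."""
--     nodes = [[False, {}]]
--     for w in words:
--         i = 0
--         for c in w:
--             j = nodes[i][1].get(c)
--             if j is None:
--                 nodes.append([False, {}])
--                 j = len(nodes) - 1
--                 nodes[i][1][c] = j
--             i = j
--         nodes[i][0] = True
--     return nodes
--
-- _PREFIX_TRIE = _build_trie(_PREFIX_WORDS)
-- _SUFFIX_TRIE = _build_trie(w[::-1] for w in _SUFFIX_WORDS)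
--
-- def segment_word(word):
--     """Segment a word into (prefix, stem, suffix)."""
--     if len(word) <= 1:
--         return ('', word, '')
--
--     n = len(word)
--     # walk the word through the prefix trie; deepest terminal depth < n wins
--     i, d, best = 0, 0, 0
--     for c in word:
--         j = _PREFIX_TRIE[i][1].get(c)
--         if j is None:
--             break
--         i, d = j, d + 1
--         if _PREFIX_TRIE[i][0] and d < n:
--             best = d
--     prefix = word[:best]
--     remaining = word[best:]
--
--     m = len(remaining)
--     # walk the reversed remainder through the reversed-suffix trie;
--     # deepest terminal depth d with d < m (or d == m when a prefix was taken) wins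
--     i, d, best = 0, 0, 0
--     for c in reversed(remaining):
--         j = _SUFFIX_TRIE[i][1].get(c)
--         if j is None:
--             break
--         i, d = j, d + 1
--         if _SUFFIX_TRIE[i][0] and (d < m or prefix):
--             best = d
--     suffix = remaining[m - best:]
--     stem = remaining[:m - best]
--     return (prefix, stem, suffix)
-- ===== Notes on version B (the rewrite author's own statement) =====
-- stated objective: alternative
-- what changed: B builds a trie of the prefixes and of the reversed suffixes once and segments by a single character-by-character automaton walk recording the deepest valid terminal depth, instead of A's scans over the length-sorted affix lists testing startswith/endswith per affix.
import Mathlib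
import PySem

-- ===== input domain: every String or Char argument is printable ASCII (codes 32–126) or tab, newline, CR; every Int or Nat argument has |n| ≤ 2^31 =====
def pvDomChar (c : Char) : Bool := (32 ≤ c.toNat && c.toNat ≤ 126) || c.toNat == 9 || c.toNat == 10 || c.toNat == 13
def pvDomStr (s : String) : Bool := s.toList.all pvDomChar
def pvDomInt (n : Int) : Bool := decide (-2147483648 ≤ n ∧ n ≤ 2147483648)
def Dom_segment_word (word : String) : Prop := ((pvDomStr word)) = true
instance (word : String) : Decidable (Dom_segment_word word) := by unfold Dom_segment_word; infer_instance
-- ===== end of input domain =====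

-- B replaces A's scans over the affix lists by a single character-by-character
-- walk through a trie of the prefixes (and of the reversed suffixes),
-- keeping the deepest valid terminal depth (alternative; same return value).

-- ===== PORT A =====
-- PREFIXES = sorted([...], key=len, reverse=True): stable sort yields this order
def pvPrefixes : List (List Char) :=
  [['c','t','h'], ['s','h'], ['c','h'], ['q','o'], ['o','k'], ['o','t'], ['c','t'],
   ['o'], ['d'], ['s'], ['k'], ['t'], ['p'], ['f'], ['y']]

-- SUFFIXES = sorted([...], key=len, reverse=True): stable sort yields this order
def pvSuffixes : List (List Char) :=
  [['a','i','i','n'], ['a','i','n'], ['i','i','n'], ['e','e','y'], ['e','d','y'],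
   ['e','y'], ['o','l'], ['o','r'], ['a','l'], ['a','r'], ['a','n'], ['a','m'], ['d','y'],
   ['y'], ['n'], ['l'], ['r']]

-- the 'for p in PREFIXES' loop with break: returns (prefix, remaining)
def pvFindPrefA : List (List Char) → List Char → List Char × List Char
  | [], r => ([], r)
  | p :: ps, r =>
    if PySem.Chars.startswith r p = true ∧ p.length < r.length then
      (p, PySem.Chars.slice r (some (p.length : Int)) none)
    else pvFindPrefA ps r

-- the 'for s in SUFFIXES' loop with break: returns (suffix, remaining)
def pvFindSufA : List (List Char) → List Char → List Char → List Char × List Char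
  | [], _, r => ([], r)
  | s :: ss, pre, r =>
    if PySem.Chars.endswith r s = true ∧ s.length < r.length then
      (s, PySem.Chars.slice r none (some (-(s.length : Int))))
    else if PySem.Chars.endswith r s = true ∧ r.length = s.length ∧ pre ≠ [] then
      (s, [])
    else pvFindSufA ss pre r

def segment_word (word : String) : String × String × String :=
  let w := word.toList
  if w.length ≤ 1 then ("", word, "") else
  let pr := pvFindPrefA pvPrefixes w
  let sr := pvFindSufA pvSuffixes pr.1 pr.2
  (String.ofList pr.1, String.ofList sr.2, String.ofList sr.1)

-- ===== PORT B =====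
-- _PREFIX_TRIE = _build_trie(_PREFIX_WORDS): flat node table (terminal, children),
-- computed once at module level; written out literally here (module-level constant).
def pvPrefTrie : List (Bool × List (Char × Nat)) :=
  [(false, [('c', 1), ('s', 4), ('q', 7), ('o', 9), ('d', 12), ('k', 13), ('t', 14), ('p', 15), ('f', 16), ('y', 17)]),
   (false, [('t', 2), ('h', 6)]),
   (true, [('h', 3)]),
   (true, []),
   (true, [('h', 5)]),
   (true, []),
   (true, []),
   (false, [('o', 8)]),
   (true, []),
   (true, [('k', 10), ('t', 11)]),
   (true, []),
   (true, []),
   (true, []),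
   (true, []),
   (true, []),
   (true, []),
   (true, []),
   (true, [])]

-- _SUFFIX_TRIE = _build_trie(w[::-1] for w in _SUFFIX_WORDS), likewise literal
def pvSufTrie : List (Bool × List (Char × Nat)) :=
  [(false, [('n', 1), ('y', 6), ('l', 11), ('r', 13), ('m', 18)]),
   (true, [('i', 2), ('a', 17)]),
   (false, [('i', 3), ('a', 5)]),
   (true, [('a', 4)]),
   (true, []),
   (true, []),
   (true, [('e', 7), ('d', 9)]),
   (true, [('e', 8)]),
   (true, []),
   (true, [('e', 10)]),
   (true, []),
   (true, [('o', 12), ('a', 15)]),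
   (true, []),
   (true, [('o', 14), ('a', 16)]),
   (true, []),
   (true, []),
   (true, []),
   (true, []),
   (false, [('a', 19)]),
   (true, [])]

-- the 'for c in word' trie walk: j = trie[i][1].get(c); break on None;
-- record best = d whenever node terminal and d < n
def pvWalkPref (n : Nat) : Nat → Nat → Nat → List Char → Nat
  | _, _, best, [] => best
  | i, d, best, c :: cs =>
    match List.lookup c (pvPrefTrie.getD i (false, [])).2 with
    | none => best
    | some j =>
      if (pvPrefTrie.getD j (false, [])).1 = true ∧ d + 1 < n then
        pvWalkPref n j (d + 1) (d + 1) cs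
      else
        pvWalkPref n j (d + 1) best cs

-- the 'for c in reversed(remaining)' walk: accept depth d when d < m or prefix
def pvWalkSuf (m : Nat) (b : Bool) : Nat → Nat → Nat → List Char → Nat
  | _, _, best, [] => best
  | i, d, best, c :: cs =>
    match List.lookup c (pvSufTrie.getD i (false, [])).2 with
    | none => best
    | some j =>
      if (pvSufTrie.getD j (false, [])).1 = true ∧ (d + 1 < m ∨ b = true) then
        pvWalkSuf m b j (d + 1) (d + 1) cs
      else
        pvWalkSuf m b j (d + 1) best cs

def segment_word_alt (word : String) : String × String × String :=
  let w := word.toList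
  if w.length ≤ 1 then ("", word, "") else
  let n := w.length
  let best := pvWalkPref n 0 0 0 w
  let pfx := w.take best
  let remaining := w.drop best
  let m := remaining.length
  let bs := pvWalkSuf m (!pfx.isEmpty) 0 0 0 remaining.reverse
  (String.ofList pfx, String.ofList (remaining.take (m - bs)), String.ofList (remaining.drop (m - bs)))

-- ===== PRECONDITION & SPEC =====
def Spec_segment_word (word : String) (out : String × String × String) : Prop := out = segment_word_alt word
instance (word : String) (out : String × String × String) : Decidable (Spec_segment_word word out) := by unfold Spec_segment_word; infer_instance

-- ===== CLAIM (what is proved, stated in full; the proofs are below) =====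
def Claim_equal_segment_word : Prop := ∀ (word : String), Dom_segment_word word → Spec_segment_word word (segment_word word)

-- ===== LEMMAS AND PROOFS =====

-- Proof-side middle layer: A's scans grouped by affix length (cascade form).
def pvPrefGroups : List (Nat × List (List Char)) :=
  [(3, [['c','t','h']]),
   (2, [['s','h'], ['c','h'], ['q','o'], ['o','k'], ['o','t'], ['c','t']]),
   (1, [['o'], ['d'], ['s'], ['k'], ['t'], ['p'], ['f'], ['y']])]

def pvSufGroups : List (Nat × List (List Char)) :=
  [(4, [['a','i','i','n']]),
   (3, [['a','i','n'], ['i','i','n'], ['e','e','y'], ['e','d','y']]),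
   (2, [['e','y'], ['o','l'], ['o','r'], ['a','l'], ['a','r'], ['a','n'], ['a','m'], ['d','y']]),
   (1, [['y'], ['n'], ['l'], ['r']])]

def pvFindPrefB : List (Nat × List (List Char)) → List Char → List Char × List Char
  | [], r => ([], r)
  | (L, g) :: gs, r =>
    if L < r.length ∧ r.take L ∈ g then (r.take L, r.drop L)
    else pvFindPrefB gs r

def pvFindSufB : List (Nat × List (List Char)) → List Char → List Char → List Char × List Char
  | [], _, r => ([], r)
  | (L, g) :: gs, pre, r =>
    if L ≤ r.length ∧ r.drop (r.length - L) ∈ g then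
      (if L < r.length then (r.drop (r.length - L), r.take (r.length - L))
       else if pre ≠ [] then (r.drop (r.length - L), [])
       else pvFindSufB gs pre r)
    else pvFindSufB gs pre r

-- The longest-valid-prefix length (cascade characterisation)
def prefLen (r : List Char) : Nat :=
  if 3 < r.length ∧ r.take 3 ∈ [['c','t','h']] then 3
  else if 2 < r.length ∧ r.take 2 ∈ [['s','h'], ['c','h'], ['q','o'], ['o','k'], ['o','t'], ['c','t']] then 2
  else if 1 < r.length ∧ r.take 1 ∈ [['o'], ['d'], ['s'], ['k'], ['t'], ['p'], ['f'], ['y']] then 1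
  else 0

-- The longest-valid-suffix length, stated on the REVERSED remainder v
def sufLenR (b : Bool) (v : List Char) : Nat :=
  if (4 < v.length ∨ b = true) ∧ v.take 4 ∈ [['n','i','i','a']] then 4
  else if (3 < v.length ∨ b = true) ∧ v.take 3 ∈ [['n','i','a'], ['n','i','i'], ['y','e','e'], ['y','d','e']] then 3
  else if (2 < v.length ∨ b = true) ∧ v.take 2 ∈ [['y','e'], ['l','o'], ['r','o'], ['l','a'], ['r','a'], ['n','a'], ['m','a'], ['y','d']] then 2
  else if (1 < v.length ∨ b = true) ∧ v.take 1 ∈ [['y'], ['n'], ['l'], ['r']] then 1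
  else 0

-- A's prefix scan over a block of candidates of one length L = one group test
theorem pvPrefA_group (L : Nat) (ps rest : List (List Char)) (r : List Char)
    (hlen : ∀ p ∈ ps, p.length = L) :
    pvFindPrefA (ps ++ rest) r =
      if L < r.length ∧ r.take L ∈ ps then (r.take L, r.drop L)
      else pvFindPrefA rest r := by
  induction ps with
  | nil => simp
  | cons p ps ih =>
    have hpL : p.length = L := hlen p (by simp)
    have hstart : PySem.Chars.startswith r p = true ↔ r.take L = p := by
      rw [PySem.Chars.startswith_iff, List.prefix_iff_eq_take, hpL, eq_comm]
    simp only [List.cons_append, pvFindPrefA]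
    by_cases hp : r.take L = p
    · by_cases hr : L < r.length
      · rw [if_pos ⟨hstart.mpr hp, by omega⟩, if_pos ⟨hr, by simp [hp]⟩,
          PySem.Chars.slice_eq_listSlice, PySem.List.slice_from r (Int.natCast_nonneg _)]
        simp [hp, hpL]
      · rw [if_neg (by rw [hstart, hpL]; tauto), ih (fun q hq => hlen q (by simp [hq]))]
        rw [if_neg (by tauto), if_neg (by tauto)]
    · rw [if_neg (by rw [hstart, hpL]; tauto), ih (fun q hq => hlen q (by simp [hq]))]
      simp only [List.mem_cons, hp, false_or]

-- A's suffix scan over a block of candidates of one length L = one group test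
theorem pvSufA_group (L : Nat) (ss rest : List (List Char)) (pre r : List Char)
    (hL : 0 < L) (hlen : ∀ s ∈ ss, s.length = L) (hnd : ss.Nodup) :
    pvFindSufA (ss ++ rest) pre r =
      if L ≤ r.length ∧ r.drop (r.length - L) ∈ ss then
        (if L < r.length then (r.drop (r.length - L), r.take (r.length - L))
         else if pre ≠ [] then (r.drop (r.length - L), [])
         else pvFindSufA rest pre r)
      else pvFindSufA rest pre r := by
  induction ss with
  | nil => simp
  | cons s ss ih =>
    have hsL : s.length = L := hlen s (by simp)
    have hnotmem : s ∉ ss := (List.nodup_cons.mp hnd).1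
    have hend : PySem.Chars.endswith r s = true ↔ r.drop (r.length - L) = s := by
      rw [PySem.Chars.endswith_iff, List.suffix_iff_eq_drop, hsL, eq_comm]
    simp only [List.cons_append, pvFindSufA]
    by_cases hd : r.drop (r.length - L) = s
    · have hdlen : (r.drop (r.length - L)).length = r.length - (r.length - L) :=
        List.length_drop ..
      have hLle : L ≤ r.length := by rw [hd, hsL] at hdlen; omega
      by_cases hr : L < r.length
      · rw [if_pos ⟨hend.mpr hd, by omega⟩, if_pos ⟨hLle, by simp [hd]⟩, if_pos hr,
          PySem.Chars.slice_eq_listSlice, PySem.List.slice_to_neg_natCast r s.length (by omega)]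
        simp [hd, hsL]
      · have hrL : r.length = L := by omega
        rw [if_neg (by rw [hend, hsL]; omega)]
        by_cases hpre : pre ≠ []
        · rw [if_pos ⟨hend.mpr hd, by omega, hpre⟩, if_pos ⟨hLle, by simp [hd]⟩,
            if_neg hr, if_pos hpre, hd]
        · rw [if_neg (by tauto), ih (fun q hq => hlen q (by simp [hq]))
            (List.nodup_cons.mp hnd).2]
          rw [if_neg (by rw [hd]; tauto), if_pos ⟨hLle, by simp [hd]⟩, if_neg hr,
            if_neg hpre]
    · rw [if_neg (by rw [hend, hsL]; tauto), if_neg (by rw [hend]; tauto),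
        ih (fun q hq => hlen q (by simp [hq])) (List.nodup_cons.mp hnd).2]
      simp only [List.mem_cons, hd, false_or]

theorem pvPref_eq (r : List Char) : pvFindPrefA pvPrefixes r = pvFindPrefB pvPrefGroups r := by
  rw [show pvPrefixes = [['c','t','h']] ++
      [['s','h'], ['c','h'], ['q','o'], ['o','k'], ['o','t'], ['c','t'],
       ['o'], ['d'], ['s'], ['k'], ['t'], ['p'], ['f'], ['y']] from rfl,
    pvPrefA_group 3 _ _ r (by decide)]
  rw [show [['s','h'], ['c','h'], ['q','o'], ['o','k'], ['o','t'], ['c','t'],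
       ['o'], ['d'], ['s'], ['k'], ['t'], ['p'], ['f'], ['y']] =
      [['s','h'], ['c','h'], ['q','o'], ['o','k'], ['o','t'], ['c','t']] ++
      [['o'], ['d'], ['s'], ['k'], ['t'], ['p'], ['f'], ['y']] from rfl,
    pvPrefA_group 2 _ _ r (by decide)]
  rw [show [['o'], ['d'], ['s'], ['k'], ['t'], ['p'], ['f'], ['y']] =
      [['o'], ['d'], ['s'], ['k'], ['t'], ['p'], ['f'], ['y']] ++ ([] : List (List Char)) from rfl,
    pvPrefA_group 1 _ _ r (by decide)]
  simp only [pvFindPrefB, pvPrefGroups, pvFindPrefA]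

theorem pvSuf_eq (pre r : List Char) :
    pvFindSufA pvSuffixes pre r = pvFindSufB pvSufGroups pre r := by
  rw [show pvSuffixes = [['a','i','i','n']] ++
      [['a','i','n'], ['i','i','n'], ['e','e','y'], ['e','d','y'],
       ['e','y'], ['o','l'], ['o','r'], ['a','l'], ['a','r'], ['a','n'], ['a','m'], ['d','y'],
       ['y'], ['n'], ['l'], ['r']] from rfl,
    pvSufA_group 4 _ _ pre r (by decide) (by decide) (by decide)]
  rw [show [['a','i','n'], ['i','i','n'], ['e','e','y'], ['e','d','y'],
       ['e','y'], ['o','l'], ['o','r'], ['a','l'], ['a','r'], ['a','n'], ['a','m'], ['d','y'],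
       ['y'], ['n'], ['l'], ['r']] =
      [['a','i','n'], ['i','i','n'], ['e','e','y'], ['e','d','y']] ++
      [['e','y'], ['o','l'], ['o','r'], ['a','l'], ['a','r'], ['a','n'], ['a','m'], ['d','y'],
       ['y'], ['n'], ['l'], ['r']] from rfl,
    pvSufA_group 3 _ _ pre r (by decide) (by decide) (by decide)]
  rw [show [['e','y'], ['o','l'], ['o','r'], ['a','l'], ['a','r'], ['a','n'], ['a','m'], ['d','y'],
       ['y'], ['n'], ['l'], ['r']] =
      [['e','y'], ['o','l'], ['o','r'], ['a','l'], ['a','r'], ['a','n'], ['a','m'], ['d','y']] ++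
      [['y'], ['n'], ['l'], ['r']] from rfl,
    pvSufA_group 2 _ _ pre r (by decide) (by decide) (by decide)]
  rw [show [['y'], ['n'], ['l'], ['r']] =
      [['y'], ['n'], ['l'], ['r']] ++ ([] : List (List Char)) from rfl,
    pvSufA_group 1 _ _ pre r (by decide) (by decide) (by decide)]
  simp only [pvFindSufB, pvSufGroups, pvFindSufA]

-- cascade = (take/drop of the cascade length)
theorem cascPref_eq (r : List Char) :
    pvFindPrefB pvPrefGroups r = (r.take (prefLen r), r.drop (prefLen r)) := by
  simp only [pvFindPrefB, pvPrefGroups, prefLen]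
  split_ifs <;> simp

-- membership of the reversed slice in the reversed group
theorem pvRevBridge (L : Nat) (g rg : List (List Char)) (hrg : List.map List.reverse g = rg)
    (r : List Char) : r.reverse.take L ∈ rg ↔ r.drop (r.length - L) ∈ g := by
  rw [← hrg, List.take_reverse, List.mem_map]
  simp [List.reverse_inj]

theorem pvMemLen (L : Nat) (g : List (List Char)) (hlen : ∀ x ∈ g, x.length = L)
    (r : List Char) (h : r.drop (r.length - L) ∈ g) : L ≤ r.length := by
  have h1 := hlen _ h
  have h2 : (r.drop (r.length - L)).length = r.length - (r.length - L) := List.length_drop ..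
  omega

-- one cascade level = one if of sufLenR
theorem pvCascSufLevel (L : Nat) (g rg : List (List Char)) (hrg : List.map List.reverse g = rg)
    (hlen : ∀ x ∈ g, x.length = L) (rest : List (Nat × List (List Char))) (restLen : Nat)
    (pre r : List Char)
    (hrest : pvFindSufB rest pre r = (r.drop (r.length - restLen), r.take (r.length - restLen))) :
    pvFindSufB ((L, g) :: rest) pre r =
      (r.drop (r.length - (if (L < r.length ∨ (!pre.isEmpty) = true) ∧ r.reverse.take L ∈ rg then L else restLen)),
       r.take (r.length - (if (L < r.length ∨ (!pre.isEmpty) = true) ∧ r.reverse.take L ∈ rg then L else restLen))) := by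
  have hmem := pvRevBridge L g rg hrg r
  simp only [pvFindSufB]
  by_cases hm : r.drop (r.length - L) ∈ g
  · have hLn : L ≤ r.length := pvMemLen L g hlen r hm
    by_cases hlt : L < r.length
    · rw [if_pos ⟨hLn, hm⟩, if_pos hlt, if_pos ⟨Or.inl hlt, hmem.mpr hm⟩]
    · by_cases hp : pre ≠ []
      · have hb : (!pre.isEmpty) = true := by simp [hp]
        rw [if_pos ⟨hLn, hm⟩, if_neg hlt, if_pos hp, if_pos ⟨Or.inr hb, hmem.mpr hm⟩]
        have h0 : r.length - L = 0 := by omega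
        simp [h0]
      · have hb : (!pre.isEmpty) = false := by simp at hp ⊢; simp [hp]
        rw [if_pos ⟨hLn, hm⟩, if_neg hlt, if_neg hp,
          if_neg (by rw [hb]; intro h; rcases h with ⟨h1, _⟩; rcases h1 with h1 | h1; exact hlt h1; exact Bool.false_ne_true h1),
          hrest]
  · rw [if_neg (by tauto), if_neg (by rw [hmem]; tauto), hrest]

theorem cascSuf_eq (pre r : List Char) :
    pvFindSufB pvSufGroups pre r =
      (r.drop (r.length - sufLenR (!pre.isEmpty) r.reverse),
       r.take (r.length - sufLenR (!pre.isEmpty) r.reverse)) := by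
  have base : pvFindSufB [] pre r = (r.drop (r.length - 0), r.take (r.length - 0)) := by
    simp [pvFindSufB]
  have l1 := pvCascSufLevel 1 [['y'], ['n'], ['l'], ['r']]
    [['y'], ['n'], ['l'], ['r']] (by decide) (by decide) [] 0 pre r base
  have l2 := pvCascSufLevel 2 [['e','y'], ['o','l'], ['o','r'], ['a','l'], ['a','r'], ['a','n'], ['a','m'], ['d','y']]
    [['y','e'], ['l','o'], ['r','o'], ['l','a'], ['r','a'], ['n','a'], ['m','a'], ['y','d']] (by decide) (by decide) _ _ pre r l1
  have l3 := pvCascSufLevel 3 [['a','i','n'], ['i','i','n'], ['e','e','y'], ['e','d','y']]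
    [['n','i','a'], ['n','i','i'], ['y','e','e'], ['y','d','e']] (by decide) (by decide) _ _ pre r l2
  have l4 := pvCascSufLevel 4 [['a','i','i','n']]
    [['n','i','i','a']] (by decide) (by decide) _ _ pre r l3
  rw [show pvSufGroups = (4, [['a','i','i','n']]) ::
      (3, [['a','i','n'], ['i','i','n'], ['e','e','y'], ['e','d','y']]) ::
      (2, [['e','y'], ['o','l'], ['o','r'], ['a','l'], ['a','r'], ['a','n'], ['a','m'], ['d','y']]) ::
      (1, [['y'], ['n'], ['l'], ['r']]) :: [] from rfl, l4]
  simp only [sufLenR, List.length_reverse]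

-- single walk step / stop / dead-node lemmas for the trie walks
theorem pvStepP (n i d best : Nat) (c : Char) (cs : List Char) (j : Nat)
    (hj : List.lookup c (pvPrefTrie.getD i (false, [])).2 = some j) :
    pvWalkPref n i d best (c :: cs) =
      if (pvPrefTrie.getD j (false, [])).1 = true ∧ d + 1 < n then
        pvWalkPref n j (d + 1) (d + 1) cs
      else pvWalkPref n j (d + 1) best cs := by
  simp only [pvWalkPref, hj]

theorem pvStopP (n i d best : Nat) (c : Char) (cs : List Char)
    (hj : List.lookup c (pvPrefTrie.getD i (false, [])).2 = none) :
    pvWalkPref n i d best (c :: cs) = best := by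
  simp only [pvWalkPref, hj]

theorem pvDeadP (n i d best : Nat) (h : (pvPrefTrie.getD i (false, [])).2 = []) :
    ∀ cs, pvWalkPref n i d best cs = best := by
  intro cs; cases cs with
  | nil => rfl
  | cons c cs => simp only [pvWalkPref, h, List.lookup]

theorem pvStepS (m : Nat) (bb : Bool) (i d best : Nat) (c : Char) (cs : List Char) (j : Nat)
    (hj : List.lookup c (pvSufTrie.getD i (false, [])).2 = some j) :
    pvWalkSuf m bb i d best (c :: cs) =
      if (pvSufTrie.getD j (false, [])).1 = true ∧ (d + 1 < m ∨ bb = true) then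
        pvWalkSuf m bb j (d + 1) (d + 1) cs
      else pvWalkSuf m bb j (d + 1) best cs := by
  simp only [pvWalkSuf, hj]

theorem pvStopS (m : Nat) (bb : Bool) (i d best : Nat) (c : Char) (cs : List Char)
    (hj : List.lookup c (pvSufTrie.getD i (false, [])).2 = none) :
    pvWalkSuf m bb i d best (c :: cs) = best := by
  simp only [pvWalkSuf, hj]

theorem pvDeadS (m : Nat) (bb : Bool) (i d best : Nat) (h : (pvSufTrie.getD i (false, [])).2 = []) :
    ∀ cs, pvWalkSuf m bb i d best cs = best := by
  intro cs; cases cs with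
  | nil => rfl
  | cons c cs => simp only [pvWalkSuf, h, List.lookup]

-- trie walk computes the cascade length (exhaustive walk of the tries)
theorem walkPref_eq (r : List Char) : pvWalkPref r.length 0 0 0 r = prefLen r := by
  rcases r with _ | ⟨a, _ | ⟨b, _ | ⟨c, rest⟩⟩⟩
  · decide
  · by_cases h1 : a = 'c'
    · subst h1
      rw [pvStepP _ _ _ _ _ _ 1 (by decide)]
      rw [if_neg (fun h => absurd h.1 (by decide))]
      try simp [prefLen, pvPrefTrie, pvWalkPref, *]
      try split_ifs <;> simp_all <;> omega
    ·
      by_cases h2 : a = 's'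
      · subst h2
        rw [pvStepP _ _ _ _ _ _ 4 (by decide)]
        rw [if_neg (fun h => by simp at h)]
        try simp [prefLen, pvPrefTrie, pvWalkPref, *]
        try split_ifs <;> simp_all <;> omega
      ·
        by_cases h3 : a = 'q'
        · subst h3
          rw [pvStepP _ _ _ _ _ _ 7 (by decide)]
          rw [if_neg (fun h => absurd h.1 (by decide))]
          try simp [prefLen, pvPrefTrie, pvWalkPref, *]
          try split_ifs <;> simp_all <;> omega
        ·
          by_cases h4 : a = 'o'
          · subst h4
            rw [pvStepP _ _ _ _ _ _ 9 (by decide)]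
            rw [if_neg (fun h => by simp at h)]
            try simp [prefLen, pvPrefTrie, pvWalkPref, *]
            try split_ifs <;> simp_all <;> omega
          ·
            by_cases h5 : a = 'd'
            · subst h5
              rw [pvStepP _ _ _ _ _ _ 12 (by decide)]
              rw [if_neg (fun h => by simp at h)]
              try simp [prefLen, pvPrefTrie, pvWalkPref, *]
              try split_ifs <;> simp_all <;> omega
            ·
              by_cases h6 : a = 'k'
              · subst h6
                rw [pvStepP _ _ _ _ _ _ 13 (by decide)]
                rw [if_neg (fun h => by simp at h)]
                try simp [prefLen, pvPrefTrie, pvWalkPref, *]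
                try split_ifs <;> simp_all <;> omega
              ·
                by_cases h7 : a = 't'
                · subst h7
                  rw [pvStepP _ _ _ _ _ _ 14 (by decide)]
                  rw [if_neg (fun h => by simp at h)]
                  try simp [prefLen, pvPrefTrie, pvWalkPref, *]
                  try split_ifs <;> simp_all <;> omega
                ·
                  by_cases h8 : a = 'p'
                  · subst h8
                    rw [pvStepP _ _ _ _ _ _ 15 (by decide)]
                    rw [if_neg (fun h => by simp at h)]
                    try simp [prefLen, pvPrefTrie, pvWalkPref, *]
                    try split_ifs <;> simp_all <;> omega
                  ·
                    by_cases h9 : a = 'f'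
                    · subst h9
                      rw [pvStepP _ _ _ _ _ _ 16 (by decide)]
                      rw [if_neg (fun h => by simp at h)]
                      try simp [prefLen, pvPrefTrie, pvWalkPref, *]
                      try split_ifs <;> simp_all <;> omega
                    ·
                      by_cases h10 : a = 'y'
                      · subst h10
                        rw [pvStepP _ _ _ _ _ _ 17 (by decide)]
                        rw [if_neg (fun h => by simp at h)]
                        try simp [prefLen, pvPrefTrie, pvWalkPref, *]
                        try split_ifs <;> simp_all <;> omega
                      ·
                        rw [pvStopP _ _ _ _ _ _ (by simp [pvPrefTrie, *])]
                        try simp [prefLen, pvPrefTrie, pvWalkPref, *]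
                        try split_ifs <;> simp_all <;> omega
  · by_cases h11 : a = 'c'
    · subst h11
      rw [pvStepP _ _ _ _ _ _ 1 (by decide)]
      rw [if_neg (fun h => absurd h.1 (by decide))]
      by_cases h12 : b = 't'
      · subst h12
        rw [pvStepP _ _ _ _ _ _ 2 (by decide)]
        rw [if_neg (fun h => by simp at h)]
        try simp [prefLen, pvPrefTrie, pvWalkPref, *]
        try split_ifs <;> simp_all <;> omega
      ·
        by_cases h13 : b = 'h'
        · subst h13
          rw [pvStepP _ _ _ _ _ _ 6 (by decide)]
          rw [if_neg (fun h => by simp at h)]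
          try simp [prefLen, pvPrefTrie, pvWalkPref, *]
          try split_ifs <;> simp_all <;> omega
        ·
          rw [pvStopP _ _ _ _ _ _ (by simp [pvPrefTrie, *])]
          try simp [prefLen, pvPrefTrie, pvWalkPref, *]
          try split_ifs <;> simp_all <;> omega
    ·
      by_cases h14 : a = 's'
      · subst h14
        rw [pvStepP _ _ _ _ _ _ 4 (by decide)]
        rw [if_pos ⟨by decide, by simp⟩]
        by_cases h15 : b = 'h'
        · subst h15
          rw [pvStepP _ _ _ _ _ _ 5 (by decide)]
          rw [if_neg (fun h => by simp at h)]
          try simp [prefLen, pvPrefTrie, pvWalkPref, *]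
          try split_ifs <;> simp_all <;> omega
        ·
          rw [pvStopP _ _ _ _ _ _ (by simp [pvPrefTrie, *])]
          try simp [prefLen, pvPrefTrie, pvWalkPref, *]
          try split_ifs <;> simp_all <;> omega
      ·
        by_cases h16 : a = 'q'
        · subst h16
          rw [pvStepP _ _ _ _ _ _ 7 (by decide)]
          rw [if_neg (fun h => absurd h.1 (by decide))]
          by_cases h17 : b = 'o'
          · subst h17
            rw [pvStepP _ _ _ _ _ _ 8 (by decide)]
            rw [if_neg (fun h => by simp at h)]
            try simp [prefLen, pvPrefTrie, pvWalkPref, *]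
            try split_ifs <;> simp_all <;> omega
          ·
            rw [pvStopP _ _ _ _ _ _ (by simp [pvPrefTrie, *])]
            try simp [prefLen, pvPrefTrie, pvWalkPref, *]
            try split_ifs <;> simp_all <;> omega
        ·
          by_cases h18 : a = 'o'
          · subst h18
            rw [pvStepP _ _ _ _ _ _ 9 (by decide)]
            rw [if_pos ⟨by decide, by simp⟩]
            by_cases h19 : b = 'k'
            · subst h19
              rw [pvStepP _ _ _ _ _ _ 10 (by decide)]
              rw [if_neg (fun h => by simp at h)]
              try simp [prefLen, pvPrefTrie, pvWalkPref, *]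
              try split_ifs <;> simp_all <;> omega
            ·
              by_cases h20 : b = 't'
              · subst h20
                rw [pvStepP _ _ _ _ _ _ 11 (by decide)]
                rw [if_neg (fun h => by simp at h)]
                try simp [prefLen, pvPrefTrie, pvWalkPref, *]
                try split_ifs <;> simp_all <;> omega
              ·
                rw [pvStopP _ _ _ _ _ _ (by simp [pvPrefTrie, *])]
                try simp [prefLen, pvPrefTrie, pvWalkPref, *]
                try split_ifs <;> simp_all <;> omega
          ·
            by_cases h21 : a = 'd'
            · subst h21
              rw [pvStepP _ _ _ _ _ _ 12 (by decide)]
              rw [if_pos ⟨by decide, by simp⟩]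
              rw [pvDeadP _ _ _ _ (by decide)]
              try simp [prefLen, pvPrefTrie, pvWalkPref, *]
              try split_ifs <;> simp_all <;> omega
            ·
              by_cases h22 : a = 'k'
              · subst h22
                rw [pvStepP _ _ _ _ _ _ 13 (by decide)]
                rw [if_pos ⟨by decide, by simp⟩]
                rw [pvDeadP _ _ _ _ (by decide)]
                try simp [prefLen, pvPrefTrie, pvWalkPref, *]
                try split_ifs <;> simp_all <;> omega
              ·
                by_cases h23 : a = 't'
                · subst h23
                  rw [pvStepP _ _ _ _ _ _ 14 (by decide)]
                  rw [if_pos ⟨by decide, by simp⟩]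
                  rw [pvDeadP _ _ _ _ (by decide)]
                  try simp [prefLen, pvPrefTrie, pvWalkPref, *]
                  try split_ifs <;> simp_all <;> omega
                ·
                  by_cases h24 : a = 'p'
                  · subst h24
                    rw [pvStepP _ _ _ _ _ _ 15 (by decide)]
                    rw [if_pos ⟨by decide, by simp⟩]
                    rw [pvDeadP _ _ _ _ (by decide)]
                    try simp [prefLen, pvPrefTrie, pvWalkPref, *]
                    try split_ifs <;> simp_all <;> omega
                  ·
                    by_cases h25 : a = 'f'
                    · subst h25
                      rw [pvStepP _ _ _ _ _ _ 16 (by decide)]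
                      rw [if_pos ⟨by decide, by simp⟩]
                      rw [pvDeadP _ _ _ _ (by decide)]
                      try simp [prefLen, pvPrefTrie, pvWalkPref, *]
                      try split_ifs <;> simp_all <;> omega
                    ·
                      by_cases h26 : a = 'y'
                      · subst h26
                        rw [pvStepP _ _ _ _ _ _ 17 (by decide)]
                        rw [if_pos ⟨by decide, by simp⟩]
                        rw [pvDeadP _ _ _ _ (by decide)]
                        try simp [prefLen, pvPrefTrie, pvWalkPref, *]
                        try split_ifs <;> simp_all <;> omega
                      ·
                        rw [pvStopP _ _ _ _ _ _ (by simp [pvPrefTrie, *])]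
                        try simp [prefLen, pvPrefTrie, pvWalkPref, *]
                        try split_ifs <;> simp_all <;> omega
  · by_cases h27 : a = 'c'
    · subst h27
      rw [pvStepP _ _ _ _ _ _ 1 (by decide)]
      rw [if_neg (fun h => absurd h.1 (by decide))]
      by_cases h28 : b = 't'
      · subst h28
        rw [pvStepP _ _ _ _ _ _ 2 (by decide)]
        rw [if_pos ⟨by decide, by simp⟩]
        by_cases h29 : c = 'h'
        · subst h29
          rw [pvStepP _ _ _ _ _ _ 3 (by decide)]
          rw [pvDeadP _ _ _ _ (by decide), pvDeadP _ _ _ _ (by decide)]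
          try simp [prefLen, pvPrefTrie, pvWalkPref, *]
          try split_ifs <;> simp_all <;> omega
        ·
          rw [pvStopP _ _ _ _ _ _ (by simp [pvPrefTrie, *])]
          try simp [prefLen, pvPrefTrie, pvWalkPref, *]
          try split_ifs <;> simp_all <;> omega
      ·
        by_cases h30 : b = 'h'
        · subst h30
          rw [pvStepP _ _ _ _ _ _ 6 (by decide)]
          rw [if_pos ⟨by decide, by simp⟩]
          rw [pvDeadP _ _ _ _ (by decide)]
          try simp [prefLen, pvPrefTrie, pvWalkPref, *]
          try split_ifs <;> simp_all <;> omega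
        ·
          rw [pvStopP _ _ _ _ _ _ (by simp [pvPrefTrie, *])]
          try simp [prefLen, pvPrefTrie, pvWalkPref, *]
          try split_ifs <;> simp_all <;> omega
    ·
      by_cases h31 : a = 's'
      · subst h31
        rw [pvStepP _ _ _ _ _ _ 4 (by decide)]
        rw [if_pos ⟨by decide, by simp⟩]
        by_cases h32 : b = 'h'
        · subst h32
          rw [pvStepP _ _ _ _ _ _ 5 (by decide)]
          rw [if_pos ⟨by decide, by simp⟩]
          rw [pvDeadP _ _ _ _ (by decide)]
          try simp [prefLen, pvPrefTrie, pvWalkPref, *]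
          try split_ifs <;> simp_all <;> omega
        ·
          rw [pvStopP _ _ _ _ _ _ (by simp [pvPrefTrie, *])]
          try simp [prefLen, pvPrefTrie, pvWalkPref, *]
          try split_ifs <;> simp_all <;> omega
      ·
        by_cases h33 : a = 'q'
        · subst h33
          rw [pvStepP _ _ _ _ _ _ 7 (by decide)]
          rw [if_neg (fun h => absurd h.1 (by decide))]
          by_cases h34 : b = 'o'
          · subst h34
            rw [pvStepP _ _ _ _ _ _ 8 (by decide)]
            rw [if_pos ⟨by decide, by simp⟩]
            rw [pvDeadP _ _ _ _ (by decide)]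
            try simp [prefLen, pvPrefTrie, pvWalkPref, *]
            try split_ifs <;> simp_all <;> omega
          ·
            rw [pvStopP _ _ _ _ _ _ (by simp [pvPrefTrie, *])]
            try simp [prefLen, pvPrefTrie, pvWalkPref, *]
            try split_ifs <;> simp_all <;> omega
        ·
          by_cases h35 : a = 'o'
          · subst h35
            rw [pvStepP _ _ _ _ _ _ 9 (by decide)]
            rw [if_pos ⟨by decide, by simp⟩]
            by_cases h36 : b = 'k'
            · subst h36
              rw [pvStepP _ _ _ _ _ _ 10 (by decide)]
              rw [if_pos ⟨by decide, by simp⟩]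
              rw [pvDeadP _ _ _ _ (by decide)]
              try simp [prefLen, pvPrefTrie, pvWalkPref, *]
              try split_ifs <;> simp_all <;> omega
            ·
              by_cases h37 : b = 't'
              · subst h37
                rw [pvStepP _ _ _ _ _ _ 11 (by decide)]
                rw [if_pos ⟨by decide, by simp⟩]
                rw [pvDeadP _ _ _ _ (by decide)]
                try simp [prefLen, pvPrefTrie, pvWalkPref, *]
                try split_ifs <;> simp_all <;> omega
              ·
                rw [pvStopP _ _ _ _ _ _ (by simp [pvPrefTrie, *])]
                try simp [prefLen, pvPrefTrie, pvWalkPref, *]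
                try split_ifs <;> simp_all <;> omega
          ·
            by_cases h38 : a = 'd'
            · subst h38
              rw [pvStepP _ _ _ _ _ _ 12 (by decide)]
              rw [if_pos ⟨by decide, by simp⟩]
              rw [pvDeadP _ _ _ _ (by decide)]
              try simp [prefLen, pvPrefTrie, pvWalkPref, *]
              try split_ifs <;> simp_all <;> omega
            ·
              by_cases h39 : a = 'k'
              · subst h39
                rw [pvStepP _ _ _ _ _ _ 13 (by decide)]
                rw [if_pos ⟨by decide, by simp⟩]
                rw [pvDeadP _ _ _ _ (by decide)]
                try simp [prefLen, pvPrefTrie, pvWalkPref, *]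
                try split_ifs <;> simp_all <;> omega
              ·
                by_cases h40 : a = 't'
                · subst h40
                  rw [pvStepP _ _ _ _ _ _ 14 (by decide)]
                  rw [if_pos ⟨by decide, by simp⟩]
                  rw [pvDeadP _ _ _ _ (by decide)]
                  try simp [prefLen, pvPrefTrie, pvWalkPref, *]
                  try split_ifs <;> simp_all <;> omega
                ·
                  by_cases h41 : a = 'p'
                  · subst h41
                    rw [pvStepP _ _ _ _ _ _ 15 (by decide)]
                    rw [if_pos ⟨by decide, by simp⟩]
                    rw [pvDeadP _ _ _ _ (by decide)]
                    try simp [prefLen, pvPrefTrie, pvWalkPref, *]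
                    try split_ifs <;> simp_all <;> omega
                  ·
                    by_cases h42 : a = 'f'
                    · subst h42
                      rw [pvStepP _ _ _ _ _ _ 16 (by decide)]
                      rw [if_pos ⟨by decide, by simp⟩]
                      rw [pvDeadP _ _ _ _ (by decide)]
                      try simp [prefLen, pvPrefTrie, pvWalkPref, *]
                      try split_ifs <;> simp_all <;> omega
                    ·
                      by_cases h43 : a = 'y'
                      · subst h43
                        rw [pvStepP _ _ _ _ _ _ 17 (by decide)]
                        rw [if_pos ⟨by decide, by simp⟩]
                        rw [pvDeadP _ _ _ _ (by decide)]
                        try simp [prefLen, pvPrefTrie, pvWalkPref, *]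
                        try split_ifs <;> simp_all <;> omega
                      ·
                        rw [pvStopP _ _ _ _ _ _ (by simp [pvPrefTrie, *])]
                        try simp [prefLen, pvPrefTrie, pvWalkPref, *]
                        try split_ifs <;> simp_all <;> omega

theorem walkSuf_eq (bb : Bool) (v : List Char) :
    pvWalkSuf v.length bb 0 0 0 v = sufLenR bb v := by
  rcases v with _ | ⟨a, _ | ⟨b, _ | ⟨c, _ | ⟨d, rest⟩⟩⟩⟩
  · cases bb <;> decide
  · by_cases h1 : a = 'n'
    · subst h1
      rw [pvStepS _ _ _ _ _ _ _ 1 (by decide)]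
      try simp [sufLenR, pvSufTrie, pvWalkSuf, *]
      try split_ifs <;> simp_all <;> omega
    ·
      by_cases h2 : a = 'y'
      · subst h2
        rw [pvStepS _ _ _ _ _ _ _ 6 (by decide)]
        try simp [sufLenR, pvSufTrie, pvWalkSuf, *]
        try split_ifs <;> simp_all <;> omega
      ·
        by_cases h3 : a = 'l'
        · subst h3
          rw [pvStepS _ _ _ _ _ _ _ 11 (by decide)]
          try simp [sufLenR, pvSufTrie, pvWalkSuf, *]
          try split_ifs <;> simp_all <;> omega
        ·
          by_cases h4 : a = 'r'
          · subst h4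
            rw [pvStepS _ _ _ _ _ _ _ 13 (by decide)]
            try simp [sufLenR, pvSufTrie, pvWalkSuf, *]
            try split_ifs <;> simp_all <;> omega
          ·
            by_cases h5 : a = 'm'
            · subst h5
              rw [pvStepS _ _ _ _ _ _ _ 18 (by decide)]
              rw [if_neg (fun h => absurd h.1 (by decide))]
              try simp [sufLenR, pvSufTrie, pvWalkSuf, *]
              try split_ifs <;> simp_all <;> omega
            ·
              rw [pvStopS _ _ _ _ _ _ _ (by simp [pvSufTrie, *])]
              try simp [sufLenR, pvSufTrie, pvWalkSuf, *]
              try split_ifs <;> simp_all <;> omega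
  · by_cases h6 : a = 'n'
    · subst h6
      rw [pvStepS _ _ _ _ _ _ _ 1 (by decide)]
      rw [if_pos ⟨by decide, Or.inl (by simp)⟩]
      by_cases h7 : b = 'i'
      · subst h7
        rw [pvStepS _ _ _ _ _ _ _ 2 (by decide)]
        rw [if_neg (fun h => absurd h.1 (by decide))]
        try simp [sufLenR, pvSufTrie, pvWalkSuf, *]
        try split_ifs <;> simp_all <;> omega
      ·
        by_cases h8 : b = 'a'
        · subst h8
          rw [pvStepS _ _ _ _ _ _ _ 17 (by decide)]
          try simp [sufLenR, pvSufTrie, pvWalkSuf, *]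
          try split_ifs <;> simp_all <;> omega
        ·
          rw [pvStopS _ _ _ _ _ _ _ (by simp [pvSufTrie, *])]
          try simp [sufLenR, pvSufTrie, pvWalkSuf, *]
          try split_ifs <;> simp_all <;> omega
    ·
      by_cases h9 : a = 'y'
      · subst h9
        rw [pvStepS _ _ _ _ _ _ _ 6 (by decide)]
        rw [if_pos ⟨by decide, Or.inl (by simp)⟩]
        by_cases h10 : b = 'e'
        · subst h10
          rw [pvStepS _ _ _ _ _ _ _ 7 (by decide)]
          try simp [sufLenR, pvSufTrie, pvWalkSuf, *]
          try split_ifs <;> simp_all <;> omega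
        ·
          by_cases h11 : b = 'd'
          · subst h11
            rw [pvStepS _ _ _ _ _ _ _ 9 (by decide)]
            try simp [sufLenR, pvSufTrie, pvWalkSuf, *]
            try split_ifs <;> simp_all <;> omega
          ·
            rw [pvStopS _ _ _ _ _ _ _ (by simp [pvSufTrie, *])]
            try simp [sufLenR, pvSufTrie, pvWalkSuf, *]
            try split_ifs <;> simp_all <;> omega
      ·
        by_cases h12 : a = 'l'
        · subst h12
          rw [pvStepS _ _ _ _ _ _ _ 11 (by decide)]
          rw [if_pos ⟨by decide, Or.inl (by simp)⟩]
          by_cases h13 : b = 'o'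
          · subst h13
            rw [pvStepS _ _ _ _ _ _ _ 12 (by decide)]
            try simp [sufLenR, pvSufTrie, pvWalkSuf, *]
            try split_ifs <;> simp_all <;> omega
          ·
            by_cases h14 : b = 'a'
            · subst h14
              rw [pvStepS _ _ _ _ _ _ _ 15 (by decide)]
              try simp [sufLenR, pvSufTrie, pvWalkSuf, *]
              try split_ifs <;> simp_all <;> omega
            ·
              rw [pvStopS _ _ _ _ _ _ _ (by simp [pvSufTrie, *])]
              try simp [sufLenR, pvSufTrie, pvWalkSuf, *]
              try split_ifs <;> simp_all <;> omega
        ·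
          by_cases h15 : a = 'r'
          · subst h15
            rw [pvStepS _ _ _ _ _ _ _ 13 (by decide)]
            rw [if_pos ⟨by decide, Or.inl (by simp)⟩]
            by_cases h16 : b = 'o'
            · subst h16
              rw [pvStepS _ _ _ _ _ _ _ 14 (by decide)]
              try simp [sufLenR, pvSufTrie, pvWalkSuf, *]
              try split_ifs <;> simp_all <;> omega
            ·
              by_cases h17 : b = 'a'
              · subst h17
                rw [pvStepS _ _ _ _ _ _ _ 16 (by decide)]
                try simp [sufLenR, pvSufTrie, pvWalkSuf, *]
                try split_ifs <;> simp_all <;> omega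
              ·
                rw [pvStopS _ _ _ _ _ _ _ (by simp [pvSufTrie, *])]
                try simp [sufLenR, pvSufTrie, pvWalkSuf, *]
                try split_ifs <;> simp_all <;> omega
          ·
            by_cases h18 : a = 'm'
            · subst h18
              rw [pvStepS _ _ _ _ _ _ _ 18 (by decide)]
              rw [if_neg (fun h => absurd h.1 (by decide))]
              by_cases h19 : b = 'a'
              · subst h19
                rw [pvStepS _ _ _ _ _ _ _ 19 (by decide)]
                try simp [sufLenR, pvSufTrie, pvWalkSuf, *]
                try split_ifs <;> simp_all <;> omega
              ·
                rw [pvStopS _ _ _ _ _ _ _ (by simp [pvSufTrie, *])]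
                try simp [sufLenR, pvSufTrie, pvWalkSuf, *]
                try split_ifs <;> simp_all <;> omega
            ·
              rw [pvStopS _ _ _ _ _ _ _ (by simp [pvSufTrie, *])]
              try simp [sufLenR, pvSufTrie, pvWalkSuf, *]
              try split_ifs <;> simp_all <;> omega
  · by_cases h20 : a = 'n'
    · subst h20
      rw [pvStepS _ _ _ _ _ _ _ 1 (by decide)]
      rw [if_pos ⟨by decide, Or.inl (by simp)⟩]
      by_cases h21 : b = 'i'
      · subst h21
        rw [pvStepS _ _ _ _ _ _ _ 2 (by decide)]
        rw [if_neg (fun h => absurd h.1 (by decide))]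
        by_cases h22 : c = 'i'
        · subst h22
          rw [pvStepS _ _ _ _ _ _ _ 3 (by decide)]
          try simp [sufLenR, pvSufTrie, pvWalkSuf, *]
          try split_ifs <;> simp_all <;> omega
        ·
          by_cases h23 : c = 'a'
          · subst h23
            rw [pvStepS _ _ _ _ _ _ _ 5 (by decide)]
            try simp [sufLenR, pvSufTrie, pvWalkSuf, *]
            try split_ifs <;> simp_all <;> omega
          ·
            rw [pvStopS _ _ _ _ _ _ _ (by simp [pvSufTrie, *])]
            try simp [sufLenR, pvSufTrie, pvWalkSuf, *]
            try split_ifs <;> simp_all <;> omega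
      ·
        by_cases h24 : b = 'a'
        · subst h24
          rw [pvStepS _ _ _ _ _ _ _ 17 (by decide)]
          rw [if_pos ⟨by decide, Or.inl (by simp)⟩]
          rw [pvDeadS _ _ _ _ _ (by decide)]
          try simp [sufLenR, pvSufTrie, pvWalkSuf, *]
          try split_ifs <;> simp_all <;> omega
        ·
          rw [pvStopS _ _ _ _ _ _ _ (by simp [pvSufTrie, *])]
          try simp [sufLenR, pvSufTrie, pvWalkSuf, *]
          try split_ifs <;> simp_all <;> omega
    ·
      by_cases h25 : a = 'y'
      · subst h25
        rw [pvStepS _ _ _ _ _ _ _ 6 (by decide)]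
        rw [if_pos ⟨by decide, Or.inl (by simp)⟩]
        by_cases h26 : b = 'e'
        · subst h26
          rw [pvStepS _ _ _ _ _ _ _ 7 (by decide)]
          rw [if_pos ⟨by decide, Or.inl (by simp)⟩]
          by_cases h27 : c = 'e'
          · subst h27
            rw [pvStepS _ _ _ _ _ _ _ 8 (by decide)]
            try simp [sufLenR, pvSufTrie, pvWalkSuf, *]
            try split_ifs <;> simp_all <;> omega
          ·
            rw [pvStopS _ _ _ _ _ _ _ (by simp [pvSufTrie, *])]
            try simp [sufLenR, pvSufTrie, pvWalkSuf, *]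
            try split_ifs <;> simp_all <;> omega
        ·
          by_cases h28 : b = 'd'
          · subst h28
            rw [pvStepS _ _ _ _ _ _ _ 9 (by decide)]
            rw [if_pos ⟨by decide, Or.inl (by simp)⟩]
            by_cases h29 : c = 'e'
            · subst h29
              rw [pvStepS _ _ _ _ _ _ _ 10 (by decide)]
              try simp [sufLenR, pvSufTrie, pvWalkSuf, *]
              try split_ifs <;> simp_all <;> omega
            ·
              rw [pvStopS _ _ _ _ _ _ _ (by simp [pvSufTrie, *])]
              try simp [sufLenR, pvSufTrie, pvWalkSuf, *]
              try split_ifs <;> simp_all <;> omega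
          ·
            rw [pvStopS _ _ _ _ _ _ _ (by simp [pvSufTrie, *])]
            try simp [sufLenR, pvSufTrie, pvWalkSuf, *]
            try split_ifs <;> simp_all <;> omega
      ·
        by_cases h30 : a = 'l'
        · subst h30
          rw [pvStepS _ _ _ _ _ _ _ 11 (by decide)]
          rw [if_pos ⟨by decide, Or.inl (by simp)⟩]
          by_cases h31 : b = 'o'
          · subst h31
            rw [pvStepS _ _ _ _ _ _ _ 12 (by decide)]
            rw [if_pos ⟨by decide, Or.inl (by simp)⟩]
            rw [pvDeadS _ _ _ _ _ (by decide)]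
            try simp [sufLenR, pvSufTrie, pvWalkSuf, *]
            try split_ifs <;> simp_all <;> omega
          ·
            by_cases h32 : b = 'a'
            · subst h32
              rw [pvStepS _ _ _ _ _ _ _ 15 (by decide)]
              rw [if_pos ⟨by decide, Or.inl (by simp)⟩]
              rw [pvDeadS _ _ _ _ _ (by decide)]
              try simp [sufLenR, pvSufTrie, pvWalkSuf, *]
              try split_ifs <;> simp_all <;> omega
            ·
              rw [pvStopS _ _ _ _ _ _ _ (by simp [pvSufTrie, *])]
              try simp [sufLenR, pvSufTrie, pvWalkSuf, *]
              try split_ifs <;> simp_all <;> omega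
        ·
          by_cases h33 : a = 'r'
          · subst h33
            rw [pvStepS _ _ _ _ _ _ _ 13 (by decide)]
            rw [if_pos ⟨by decide, Or.inl (by simp)⟩]
            by_cases h34 : b = 'o'
            · subst h34
              rw [pvStepS _ _ _ _ _ _ _ 14 (by decide)]
              rw [if_pos ⟨by decide, Or.inl (by simp)⟩]
              rw [pvDeadS _ _ _ _ _ (by decide)]
              try simp [sufLenR, pvSufTrie, pvWalkSuf, *]
              try split_ifs <;> simp_all <;> omega
            ·
              by_cases h35 : b = 'a'
              · subst h35
                rw [pvStepS _ _ _ _ _ _ _ 16 (by decide)]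
                rw [if_pos ⟨by decide, Or.inl (by simp)⟩]
                rw [pvDeadS _ _ _ _ _ (by decide)]
                try simp [sufLenR, pvSufTrie, pvWalkSuf, *]
                try split_ifs <;> simp_all <;> omega
              ·
                rw [pvStopS _ _ _ _ _ _ _ (by simp [pvSufTrie, *])]
                try simp [sufLenR, pvSufTrie, pvWalkSuf, *]
                try split_ifs <;> simp_all <;> omega
          ·
            by_cases h36 : a = 'm'
            · subst h36
              rw [pvStepS _ _ _ _ _ _ _ 18 (by decide)]
              rw [if_neg (fun h => absurd h.1 (by decide))]
              by_cases h37 : b = 'a'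
              · subst h37
                rw [pvStepS _ _ _ _ _ _ _ 19 (by decide)]
                rw [if_pos ⟨by decide, Or.inl (by simp)⟩]
                rw [pvDeadS _ _ _ _ _ (by decide)]
                try simp [sufLenR, pvSufTrie, pvWalkSuf, *]
                try split_ifs <;> simp_all <;> omega
              ·
                rw [pvStopS _ _ _ _ _ _ _ (by simp [pvSufTrie, *])]
                try simp [sufLenR, pvSufTrie, pvWalkSuf, *]
                try split_ifs <;> simp_all <;> omega
            ·
              rw [pvStopS _ _ _ _ _ _ _ (by simp [pvSufTrie, *])]
              try simp [sufLenR, pvSufTrie, pvWalkSuf, *]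
              try split_ifs <;> simp_all <;> omega
  · by_cases h38 : a = 'n'
    · subst h38
      rw [pvStepS _ _ _ _ _ _ _ 1 (by decide)]
      rw [if_pos ⟨by decide, Or.inl (by simp)⟩]
      by_cases h39 : b = 'i'
      · subst h39
        rw [pvStepS _ _ _ _ _ _ _ 2 (by decide)]
        rw [if_neg (fun h => absurd h.1 (by decide))]
        by_cases h40 : c = 'i'
        · subst h40
          rw [pvStepS _ _ _ _ _ _ _ 3 (by decide)]
          rw [if_pos ⟨by decide, Or.inl (by simp)⟩]
          by_cases h41 : d = 'a'
          · subst h41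
            rw [pvStepS _ _ _ _ _ _ _ 4 (by decide)]
            rw [pvDeadS _ _ _ _ _ (by decide), pvDeadS _ _ _ _ _ (by decide)]
            try simp [sufLenR, pvSufTrie, pvWalkSuf, *]
            try split_ifs <;> simp_all <;> omega
          ·
            rw [pvStopS _ _ _ _ _ _ _ (by simp [pvSufTrie, *])]
            try simp [sufLenR, pvSufTrie, pvWalkSuf, *]
            try split_ifs <;> simp_all <;> omega
        ·
          by_cases h42 : c = 'a'
          · subst h42
            rw [pvStepS _ _ _ _ _ _ _ 5 (by decide)]
            rw [if_pos ⟨by decide, Or.inl (by simp)⟩]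
            rw [pvDeadS _ _ _ _ _ (by decide)]
            try simp [sufLenR, pvSufTrie, pvWalkSuf, *]
            try split_ifs <;> simp_all <;> omega
          ·
            rw [pvStopS _ _ _ _ _ _ _ (by simp [pvSufTrie, *])]
            try simp [sufLenR, pvSufTrie, pvWalkSuf, *]
            try split_ifs <;> simp_all <;> omega
      ·
        by_cases h43 : b = 'a'
        · subst h43
          rw [pvStepS _ _ _ _ _ _ _ 17 (by decide)]
          rw [if_pos ⟨by decide, Or.inl (by simp)⟩]
          rw [pvDeadS _ _ _ _ _ (by decide)]
          try simp [sufLenR, pvSufTrie, pvWalkSuf, *]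
          try split_ifs <;> simp_all <;> omega
        ·
          rw [pvStopS _ _ _ _ _ _ _ (by simp [pvSufTrie, *])]
          try simp [sufLenR, pvSufTrie, pvWalkSuf, *]
          try split_ifs <;> simp_all <;> omega
    ·
      by_cases h44 : a = 'y'
      · subst h44
        rw [pvStepS _ _ _ _ _ _ _ 6 (by decide)]
        rw [if_pos ⟨by decide, Or.inl (by simp)⟩]
        by_cases h45 : b = 'e'
        · subst h45
          rw [pvStepS _ _ _ _ _ _ _ 7 (by decide)]
          rw [if_pos ⟨by decide, Or.inl (by simp)⟩]
          by_cases h46 : c = 'e'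
          · subst h46
            rw [pvStepS _ _ _ _ _ _ _ 8 (by decide)]
            rw [if_pos ⟨by decide, Or.inl (by simp)⟩]
            rw [pvDeadS _ _ _ _ _ (by decide)]
            try simp [sufLenR, pvSufTrie, pvWalkSuf, *]
            try split_ifs <;> simp_all <;> omega
          ·
            rw [pvStopS _ _ _ _ _ _ _ (by simp [pvSufTrie, *])]
            try simp [sufLenR, pvSufTrie, pvWalkSuf, *]
            try split_ifs <;> simp_all <;> omega
        ·
          by_cases h47 : b = 'd'
          · subst h47
            rw [pvStepS _ _ _ _ _ _ _ 9 (by decide)]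
            rw [if_pos ⟨by decide, Or.inl (by simp)⟩]
            by_cases h48 : c = 'e'
            · subst h48
              rw [pvStepS _ _ _ _ _ _ _ 10 (by decide)]
              rw [if_pos ⟨by decide, Or.inl (by simp)⟩]
              rw [pvDeadS _ _ _ _ _ (by decide)]
              try simp [sufLenR, pvSufTrie, pvWalkSuf, *]
              try split_ifs <;> simp_all <;> omega
            ·
              rw [pvStopS _ _ _ _ _ _ _ (by simp [pvSufTrie, *])]
              try simp [sufLenR, pvSufTrie, pvWalkSuf, *]
              try split_ifs <;> simp_all <;> omega
          ·
            rw [pvStopS _ _ _ _ _ _ _ (by simp [pvSufTrie, *])]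
            try simp [sufLenR, pvSufTrie, pvWalkSuf, *]
            try split_ifs <;> simp_all <;> omega
      ·
        by_cases h49 : a = 'l'
        · subst h49
          rw [pvStepS _ _ _ _ _ _ _ 11 (by decide)]
          rw [if_pos ⟨by decide, Or.inl (by simp)⟩]
          by_cases h50 : b = 'o'
          · subst h50
            rw [pvStepS _ _ _ _ _ _ _ 12 (by decide)]
            rw [if_pos ⟨by decide, Or.inl (by simp)⟩]
            rw [pvDeadS _ _ _ _ _ (by decide)]
            try simp [sufLenR, pvSufTrie, pvWalkSuf, *]
            try split_ifs <;> simp_all <;> omega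
          ·
            by_cases h51 : b = 'a'
            · subst h51
              rw [pvStepS _ _ _ _ _ _ _ 15 (by decide)]
              rw [if_pos ⟨by decide, Or.inl (by simp)⟩]
              rw [pvDeadS _ _ _ _ _ (by decide)]
              try simp [sufLenR, pvSufTrie, pvWalkSuf, *]
              try split_ifs <;> simp_all <;> omega
            ·
              rw [pvStopS _ _ _ _ _ _ _ (by simp [pvSufTrie, *])]
              try simp [sufLenR, pvSufTrie, pvWalkSuf, *]
              try split_ifs <;> simp_all <;> omega
        ·
          by_cases h52 : a = 'r'
          · subst h52
            rw [pvStepS _ _ _ _ _ _ _ 13 (by decide)]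
            rw [if_pos ⟨by decide, Or.inl (by simp)⟩]
            by_cases h53 : b = 'o'
            · subst h53
              rw [pvStepS _ _ _ _ _ _ _ 14 (by decide)]
              rw [if_pos ⟨by decide, Or.inl (by simp)⟩]
              rw [pvDeadS _ _ _ _ _ (by decide)]
              try simp [sufLenR, pvSufTrie, pvWalkSuf, *]
              try split_ifs <;> simp_all <;> omega
            ·
              by_cases h54 : b = 'a'
              · subst h54
                rw [pvStepS _ _ _ _ _ _ _ 16 (by decide)]
                rw [if_pos ⟨by decide, Or.inl (by simp)⟩]
                rw [pvDeadS _ _ _ _ _ (by decide)]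
                try simp [sufLenR, pvSufTrie, pvWalkSuf, *]
                try split_ifs <;> simp_all <;> omega
              ·
                rw [pvStopS _ _ _ _ _ _ _ (by simp [pvSufTrie, *])]
                try simp [sufLenR, pvSufTrie, pvWalkSuf, *]
                try split_ifs <;> simp_all <;> omega
          ·
            by_cases h55 : a = 'm'
            · subst h55
              rw [pvStepS _ _ _ _ _ _ _ 18 (by decide)]
              rw [if_neg (fun h => absurd h.1 (by decide))]
              by_cases h56 : b = 'a'
              · subst h56
                rw [pvStepS _ _ _ _ _ _ _ 19 (by decide)]
                rw [if_pos ⟨by decide, Or.inl (by simp)⟩]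
                rw [pvDeadS _ _ _ _ _ (by decide)]
                try simp [sufLenR, pvSufTrie, pvWalkSuf, *]
                try split_ifs <;> simp_all <;> omega
              ·
                rw [pvStopS _ _ _ _ _ _ _ (by simp [pvSufTrie, *])]
                try simp [sufLenR, pvSufTrie, pvWalkSuf, *]
                try split_ifs <;> simp_all <;> omega
            ·
              rw [pvStopS _ _ _ _ _ _ _ (by simp [pvSufTrie, *])]
              try simp [sufLenR, pvSufTrie, pvWalkSuf, *]
              try split_ifs <;> simp_all <;> omega



-- ===== VERDICT (by name: the statement is the Claim_ definition above) =====
theorem segment_word_spec : Claim_equal_segment_word := by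
  intro word _
  unfold Spec_segment_word segment_word segment_word_alt
  simp only []
  split
  · rfl
  · rw [pvPref_eq, cascPref_eq, walkPref_eq]
    simp only [pvSuf_eq, cascSuf_eq]
    rw [← List.length_reverse (as := List.drop (prefLen word.toList) word.toList), walkSuf_eq]
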